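-- pv_equiv track=rewrite | github.com/linfaxin/zd_browser_app | tools/apply_zh_localization.py | encode_dart_string_body
-- ===== SOURCE A (Python) =====
-- def read_string_interpolation(body: str, start: int) -> tuple[str, int]:
--     """Read ${...} or $identifier from body starting at body[start] == '$'. Returns (segment, new_index)."""
--     if start >= len(body):
--         return ("$", start + 1)
--     if body[start] != "$":
--         return ("", start)
--     if start + 1 < len(body) and body[start + 1] == "{":
--         j = start + 2
--         depth = 1
--         while j < len(body) and depth > 0:
--             c = body[j]
--             if c == "{":
--                 depth += 1
--             elif c == "}":
--                 depth -= 1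
--             j += 1
--         return (body[start:j], j)
--     j = start + 1
--     while j < len(body) and (body[j].isalnum() or body[j] == "_"):
--         j += 1
--     return (body[start:j], j)
--
-- def encode_dart_string_body(s: str, double_quote: bool) -> str:
--     out: list[str] = []
--     close = '"' if double_quote else "'"
--     i = 0
--     while i < len(s):
--         ch = s[i]
--         if ch == "\\":
--             out.append("\\\\")
--             i += 1
--         elif double_quote and ch == '"':
--             out.append('\\"')
--             i += 1
--         elif not double_quote and ch == "'":
--             out.append("\\'")
--             i += 1
--         elif ch == "\n":
--             out.append("\\n")
--             i += 1
--         elif ch == "\r":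
--             out.append("\\r")
--             i += 1
--         elif ch == "\t":
--             out.append("\\t")
--             i += 1
--         elif ch == "$":
--             if i + 1 < len(s) and s[i + 1] == "{":
--                 seg, j = read_string_interpolation(s, i)
--                 out.append(seg)
--                 i = j
--             else:
--                 out.append(r"\$")
--                 i += 1
--         else:
--             out.append(ch)
--             i += 1
--     return "".join(out)
-- ===== SOURCE B (Python) =====
-- def _split_interpolations(s):
--     """Phase 1: split s into tokens (is_interp, segment); ${...} spans found by brace-depth counting."""
--     tokens = []
--     plain = []
--     i = 0
--     n = len(s)
--     while i < n:
--         if s[i] == '$' and i + 1 < n and s[i + 1] == '{':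
--             if plain:
--                 tokens.append((False, ''.join(plain)))
--                 plain = []
--             depth = 1
--             j = i + 2
--             while j < n and depth > 0:
--                 if s[j] == '{':
--                     depth += 1
--                 elif s[j] == '}':
--                     depth -= 1
--                 j += 1
--             tokens.append((True, s[i:j]))
--             i = j
--         else:
--             plain.append(s[i])
--             i += 1
--     if plain:
--         tokens.append((False, ''.join(plain)))
--     return tokens
--
--
-- def _escape_plain(text, double_quote):
--     """Phase 2 helper: escape plain (non-interpolation) text."""
--     quote = '"' if double_quote else "'"
--     mapping = {'\\': '\\\\', '\n': '\\n', '\r': '\\r', '\t': '\\t', '$': '\\$', quote: '\\' + quote}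
--     return ''.join(mapping.get(c, c) for c in text)
--
--
-- def encode_dart_string_body(s, double_quote):
--     return ''.join(seg if is_interp else _escape_plain(seg, double_quote)
--                    for is_interp, seg in _split_interpolations(s))
-- ===== Notes on version B (the rewrite author's own statement) =====
-- stated objective: alternative
-- what changed: Replaces A's single index-jumping loop that escapes and detects ${...} spans inline with a two-phase decomposition: first tokenize the string into plain-text and interpolation-span segments by brace-depth scanning, then escape only the plain segments via a lookup table and join.
import Mathlib
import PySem

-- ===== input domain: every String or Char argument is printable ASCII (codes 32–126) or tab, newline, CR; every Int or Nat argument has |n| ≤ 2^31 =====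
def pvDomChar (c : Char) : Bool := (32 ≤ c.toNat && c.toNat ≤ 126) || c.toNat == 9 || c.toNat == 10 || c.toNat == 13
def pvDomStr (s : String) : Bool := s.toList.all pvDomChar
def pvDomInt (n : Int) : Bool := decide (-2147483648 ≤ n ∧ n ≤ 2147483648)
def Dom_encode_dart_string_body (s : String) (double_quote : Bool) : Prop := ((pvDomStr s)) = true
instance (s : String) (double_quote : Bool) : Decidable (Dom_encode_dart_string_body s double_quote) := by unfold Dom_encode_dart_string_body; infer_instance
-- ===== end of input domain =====

-- B re-implements A as a two-phase tokenize-then-escape pass (alternative decomposition, same O(n) cost); return values proved equal on all inputs.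

-- ===== PORT A =====

-- the depth-counting loop of read_string_interpolation, over the chars after "${"
def scanBraceA : List Char → Nat → List Char × List Char
  | [], _ => ([], [])
  | c :: t, depth =>
    let d := if c = '{' then depth + 1 else if c = '}' then depth - 1 else depth
    if d = 0 then ([c], t)
    else
      let r := scanBraceA t d
      (c :: r.1, r.2)

-- the $identifier loop of read_string_interpolation (unreachable from the entry, ported for fidelity)
def scanIdentA : List Char → List Char × List Char
  | [] => ([], [])
  | c :: t =>
    if PySem.Chars.isalnum c || c = '_' then
      let r := scanIdentA t
      (c :: r.1, r.2)
    else ([], c :: t)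

-- read_string_interpolation: input is the suffix of the string starting at index `start`
def read_string_interpolation : List Char → List Char × List Char
  | [] => (['$'], [])
  | c :: t =>
    if c ≠ '$' then ([], c :: t)
    else if t.head? = some '{' then
      let r := scanBraceA t.tail 1
      (c :: '{' :: r.1, r.2)
    else
      let r := scanIdentA t
      (c :: r.1, r.2)

lemma scanBraceA_rest_le : ∀ (l : List Char) (d : Nat), (scanBraceA l d).2.length ≤ l.length := by
  intro l
  induction l with
  | nil => intro d; simp [scanBraceA]
  | cons c t ih =>
    intro d
    simp only [scanBraceA]
    split_ifs <;> simp <;> exact Nat.le_succ_of_le (ih _)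

lemma read_interp_rest_lt (t : List Char) (h : t.head? = some '{') :
    (read_string_interpolation ('$' :: t)).2.length < t.length + 1 := by
  cases t with
  | nil => simp at h
  | cons a t2 =>
    simp only [List.head?_cons, Option.some_inj] at h
    subst h
    have he : read_string_interpolation ('$' :: '{' :: t2)
        = ('$' :: '{' :: (scanBraceA t2 1).1, (scanBraceA t2 1).2) := by
      simp [read_string_interpolation]
    rw [he]
    have := scanBraceA_rest_le t2 1
    simp only [List.length_cons]
    omega

def encA (dq : Bool) : List Char → List Char
  | [] => []
  | c :: t =>
    if c = '\\' then '\\' :: '\\' :: encA dq t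
    else if dq && (c = '"') then '\\' :: '"' :: encA dq t
    else if !dq && (c = '\'') then '\\' :: '\'' :: encA dq t
    else if c = '\n' then '\\' :: 'n' :: encA dq t
    else if c = '\r' then '\\' :: 'r' :: encA dq t
    else if c = '\t' then '\\' :: 't' :: encA dq t
    else if h : c = '$' then
      if h2 : t.head? = some '{' then
        let r := read_string_interpolation (c :: t)
        r.1 ++ encA dq r.2
      else '\\' :: '$' :: encA dq t
    else c :: encA dq t
termination_by l => l.length
decreasing_by
  all_goals simp only [List.length_cons]
  all_goals try omega
  subst h
  exact read_interp_rest_lt t h2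

def encode_dart_string_body (s : String) (double_quote : Bool) : String :=
  String.mk (encA double_quote s.toList)

-- ===== PORT B =====

-- phase-1 depth loop (same loop as in Source B's _split_interpolations)
def scanBraceB : List Char → Nat → List Char × List Char
  | [], _ => ([], [])
  | c :: t, depth =>
    let d := if c = '{' then depth + 1 else if c = '}' then depth - 1 else depth
    if d = 0 then ([c], t)
    else
      let r := scanBraceB t d
      (c :: r.1, r.2)

-- cited by splitTok's decreasing_by: B's depth loop equals A's (identical code)
lemma scanBraceB_eq (l : List Char) (d : Nat) : scanBraceB l d = scanBraceA l d := by
  induction l generalizing d with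
  | nil => simp [scanBraceA, scanBraceB]
  | cons a u ih => simp only [scanBraceA, scanBraceB]; split_ifs <;> simp [ih]

def flushPlain (plain : List Char) : List (Bool × List Char) :=
  if plain = [] then [] else [(false, plain.reverse)]

-- phase 1: tokenize into (is_interp, segment); `plain` accumulates pending plain chars (reversed)
def splitTok : List Char → List Char → List (Bool × List Char)
  | [], plain => flushPlain plain
  | c :: t, plain =>
    if h : c = '$' ∧ t.head? = some '{' then
      let r := scanBraceB t.tail 1
      flushPlain plain ++ (true, c :: '{' :: r.1) :: splitTok r.2 []
    else splitTok t (c :: plain)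
termination_by l _ => l.length
decreasing_by
  all_goals simp only [scanBraceB_eq, List.length_cons]
  · have h1 := scanBraceA_rest_le t.tail 1
    have h2 : t.tail.length ≤ t.length := by cases t <;> simp
    omega
  · omega

-- phase 2: the escape table of _escape_plain, per char
def escChar (dq : Bool) (c : Char) : List Char :=
  if c = '\\' then ['\\', '\\']
  else if c = '\n' then ['\\', 'n']
  else if c = '\r' then ['\\', 'r']
  else if c = '\t' then ['\\', 't']
  else if c = '$' then ['\\', '$']
  else if c = (if dq then '"' else '\'') then ['\\', if dq then '"' else '\'']
  else [c]

def encode_dart_string_body_alt (s : String) (double_quote : Bool) : String :=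
  String.mk
    (((splitTok s.toList []).map
        (fun p => if p.1 then p.2 else p.2.flatMap (escChar double_quote))).flatten)

-- ===== PRECONDITION & SPEC =====
def Spec_encode_dart_string_body (s : String) (double_quote : Bool) (out : String) : Prop := out = encode_dart_string_body_alt s double_quote
instance (s : String) (double_quote : Bool) (out : String) : Decidable (Spec_encode_dart_string_body s double_quote out) := by unfold Spec_encode_dart_string_body; infer_instance

-- ===== CLAIM (what is proved, stated in full; the proofs are below) =====
def Claim_equal_encode_dart_string_body : Prop := ∀ (s : String) (double_quote : Bool), Dom_encode_dart_string_body s double_quote → Spec_encode_dart_string_body s double_quote (encode_dart_string_body s double_quote)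

-- ===== LEMMAS AND PROOFS =====

def renderTok (dq : Bool) (toks : List (Bool × List Char)) : List Char :=
  (toks.map (fun p => if p.1 then p.2 else p.2.flatMap (escChar dq))).flatten

lemma encA_nil (dq : Bool) : encA dq [] = [] := by rw [encA]

lemma renderTok_append (dq : Bool) (a b : List (Bool × List Char)) :
    renderTok dq (a ++ b) = renderTok dq a ++ renderTok dq b := by
  simp [renderTok]

lemma renderTok_cons_true (dq : Bool) (seg : List Char) (r : List (Bool × List Char)) :
    renderTok dq ((true, seg) :: r) = seg ++ renderTok dq r := by
  simp [renderTok]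

lemma renderTok_flush (dq : Bool) (plain : List Char) :
    renderTok dq (flushPlain plain) = plain.reverse.flatMap (escChar dq) := by
  unfold flushPlain renderTok
  split <;> simp_all

lemma escChar_plain (dq : Bool) (c : Char) (t : List Char)
    (h : ¬(c = '$' ∧ t.head? = some '{')) :
    encA dq (c :: t) = escChar dq c ++ encA dq t := by
  rw [encA]
  by_cases h1 : c = '\\'
  · subst h1; simp [escChar]
  by_cases h2 : c = '\n'
  · subst h2; simp [escChar]
  by_cases h3 : c = '\r'
  · subst h3; simp [escChar]
  by_cases h4 : c = '\t'
  · subst h4; simp [escChar]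
  by_cases h5 : c = '$'
  · subst h5
    have hh : ¬ t.head? = some '{' := fun hc => h ⟨rfl, hc⟩
    simp [escChar, hh]
  by_cases h6 : c = (if dq then '"' else '\'')
  · cases dq <;> simp_all [escChar]
  · cases dq <;> simp_all [escChar]

lemma main_lemma (dq : Bool) : ∀ (n : Nat) (l plain : List Char), l.length ≤ n →
    renderTok dq (splitTok l plain) = plain.reverse.flatMap (escChar dq) ++ encA dq l := by
  intro n
  induction n with
  | zero =>
    intro l plain hl
    have : l = [] := List.length_eq_zero_iff.mp (Nat.le_zero.mp hl)
    subst this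
    simp [splitTok, encA_nil, renderTok_flush]
  | succ n ih =>
    intro l plain hl
    cases l with
    | nil => simp [splitTok, encA_nil, renderTok_flush]
    | cons c t =>
      by_cases h : c = '$' ∧ t.head? = some '{'
      · obtain ⟨hc, hh⟩ := h
        subst hc
        cases t with
        | nil => simp at hh
        | cons a t2 =>
          simp only [List.head?] at hh
          injection hh with hh; subst hh
          rw [splitTok]
          try simp only [List.tail_cons]
          have hrest : (scanBraceB t2 1).2.length ≤ n := by
            rw [scanBraceB_eq]
            have := scanBraceA_rest_le t2 1
            simp at hl
            omega
          have hA : encA dq ('$' :: '{' :: t2)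
              = '$' :: '{' :: (scanBraceA t2 1).1 ++ encA dq (scanBraceA t2 1).2 := by
            rw [encA]
            simp only [read_string_interpolation]
            norm_num
            simp only [eq_false (by decide : ¬ ('$' : Char) = '\\'),
              eq_false (by decide : ¬ ('$' : Char) = '"'),
              eq_false (by decide : ¬ ('$' : Char) = '\''),
              eq_false (by decide : ¬ ('$' : Char) = '\n'),
              eq_false (by decide : ¬ ('$' : Char) = '\x0d'),
              eq_false (by decide : ¬ ('$' : Char) = '\t'),
              and_false, if_false]
          split
          next =>
            rw [hA, renderTok_append, renderTok_flush, renderTok_cons_true,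
              ih _ [] hrest, scanBraceB_eq]
            simp
          next h' => simp at h'
      · rw [splitTok]
        simp only [dif_neg h]
        rw [ih t (c :: plain) (by simp at hl; omega)]
        rw [escChar_plain dq c t h]
        simp

-- ===== VERDICT (by name: the statement is the Claim_ definition above) =====
theorem encode_dart_string_body_spec : Claim_equal_encode_dart_string_body := by
  intro s dq _
  unfold Spec_encode_dart_string_body encode_dart_string_body encode_dart_string_body_alt
  rw [show encA dq s.toList = renderTok dq (splitTok s.toList []) from
    (main_lemma dq s.toList.length s.toList [] le_rfl).trans (by simp) |>.symm]
  rfl
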